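-- pv_equiv track=rewrite | github.com/neneadvait/15-112TermProject | 15-112TermProject.py | splitLocations
-- ===== SOURCE A (Python) =====
-- def levels(elements):
--     levelList = [0] * len(elements)
--     level = 0
--     for i in range(len(elements)):
--         if(elements[i] in "{[("):
--             level += 1
--             levelList[i] = level
--         elif(elements[i] in "}])"):
--             levelList[i] = level
--             level -= 1
--         else:
--             levelList[i] = level
--     return levelList
--
-- def splitLocations(elements):
--     levelList = levels(elements)
--     split = ["0"] * len(elements)
--     for i in range(len(elements)):
--         if(levelList[i] == 0):
--             if(elements[i] == "+"):
--                 split[i] = "+"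
--             elif(elements[i] == "*"):
--                 split[i] = "*"
--             elif(elements[i] == "/"):
--                 split[i] = "/"
--             elif(elements[i] == "^"):
--                 split[i] = "^"
--     return split
-- ===== SOURCE B (Python) =====
-- def splitLocations(elements):
--     split = ["0"] * len(elements)
--     level = 0
--     for i, e in enumerate(elements):
--         if e in "{[(":
--             level += 1
--         elif e in "}])":
--             level -= 1
--         elif level == 0 and e in ("+", "*", "/", "^"):
--             split[i] = e
--     return split
-- ===== Notes on version B (the rewrite author's own statement) =====
-- stated objective: simpler
-- what changed: B drops the separate levels() pass and levelList entirely, maintaining a single scalar depth counter in one pass over the elements and writing an operator into the output only when the running depth is 0.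
import Mathlib
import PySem

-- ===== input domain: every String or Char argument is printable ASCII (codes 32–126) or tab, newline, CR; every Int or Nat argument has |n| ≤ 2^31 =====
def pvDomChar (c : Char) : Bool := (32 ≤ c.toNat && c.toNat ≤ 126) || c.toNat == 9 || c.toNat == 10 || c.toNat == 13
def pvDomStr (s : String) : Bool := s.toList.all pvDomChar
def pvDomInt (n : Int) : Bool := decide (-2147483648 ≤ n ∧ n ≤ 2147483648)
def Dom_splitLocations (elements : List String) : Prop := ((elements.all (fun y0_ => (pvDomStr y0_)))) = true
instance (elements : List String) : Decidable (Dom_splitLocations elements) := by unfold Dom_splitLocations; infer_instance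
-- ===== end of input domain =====

-- B folds the depth computation into the single output pass (scalar running level, no levelList); same values, one pass instead of two.
-- ===== PORT A =====
-- helper `levels`: the index loop with running `level`, as structural recursion producing levelList in order
def levelsGo (level : Int) : List String → List Int
  | [] => []
  | e :: rest =>
    if PySem.Str.isIn e "{[(" then (level + 1) :: levelsGo (level + 1) rest
    else if PySem.Str.isIn e "}])" then level :: levelsGo (level - 1) rest
    else level :: levelsGo level rest

def levels (elements : List String) : List Int := levelsGo 0 elements

def splitLocations (elements : List String) : List String :=
  (elements.zip (levels elements)).map (fun p =>
    if p.2 == 0 then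
      if p.1 == "+" then "+"
      else if p.1 == "*" then "*"
      else if p.1 == "/" then "/"
      else if p.1 == "^" then "^"
      else "0"
    else "0")

-- ===== PORT B =====
-- single pass with scalar `level`
def altGo (level : Int) : List String → List String
  | [] => []
  | e :: rest =>
    if PySem.Str.isIn e "{[(" then "0" :: altGo (level + 1) rest
    else if PySem.Str.isIn e "}])" then "0" :: altGo (level - 1) rest
    else (if level == 0 && (e == "+" || e == "*" || e == "/" || e == "^") then e else "0")
         :: altGo level rest

def splitLocations_alt (elements : List String) : List String := altGo 0 elements

-- ===== PRECONDITION & SPEC =====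
def Spec_splitLocations (elements : List String) (out : List String) : Prop := out = splitLocations_alt elements
instance (elements : List String) (out : List String) : Decidable (Spec_splitLocations elements out) := by unfold Spec_splitLocations; infer_instance

-- ===== CLAIM (what is proved, stated in full; the proofs are below) =====
def Claim_equal_splitLocations : Prop := ∀ (elements : List String), Dom_splitLocations elements → Spec_splitLocations elements (splitLocations elements)

-- ===== LEMMAS AND PROOFS =====
lemma go_eq (xs : List String) : ∀ (level : Int),
    (xs.zip (levelsGo level xs)).map (fun p =>
      if p.2 == 0 then
        if p.1 == "+" then "+"
        else if p.1 == "*" then "*"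
        else if p.1 == "/" then "/"
        else if p.1 == "^" then "^"
        else "0"
      else "0") = altGo level xs := by
  induction xs with
  | nil => intro level; rfl
  | cons e rest ih =>
    intro level
    by_cases h1 : PySem.Chars.isIn e.toList "{[(".toList = true
    · have hne : e ≠ "+" ∧ e ≠ "*" ∧ e ≠ "/" ∧ e ≠ "^" := by
        rw [PySem.Chars.isIn_iff_infix] at h1
        refine ⟨?_, ?_, ?_, ?_⟩ <;> (rintro rfl; revert h1; decide)
      have h1' : PySem.Chars.isIn e.toList ['{','[','('] = true := h1
      simp [levelsGo, altGo, PySem.Str.isIn, h1', hne.1, hne.2.1, hne.2.2.1, hne.2.2.2]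
      simpa using ih (level + 1)
    · by_cases h2 : PySem.Chars.isIn e.toList "}])".toList = true
      · have hne : e ≠ "+" ∧ e ≠ "*" ∧ e ≠ "/" ∧ e ≠ "^" := by
          rw [PySem.Chars.isIn_iff_infix] at h2
          refine ⟨?_, ?_, ?_, ?_⟩ <;> (rintro rfl; revert h2; decide)
        have h1' : ¬ PySem.Chars.isIn e.toList ['{','[','('] = true := h1
        have h2' : PySem.Chars.isIn e.toList ['}',']',')'] = true := h2
        simp [levelsGo, altGo, PySem.Str.isIn, h1', h2', hne.1, hne.2.1, hne.2.2.1, hne.2.2.2]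
        simpa using ih (level - 1)
      · simp only [levelsGo, altGo, PySem.Str.isIn, h1, h2, Bool.false_eq_true, if_false, List.zip_cons_cons, List.map_cons]
        rw [ih]
        refine congrArg (· :: altGo level rest) ?_
        by_cases hl : level = 0
        · subst hl
          simp only [beq_self_eq_true, if_true]
          by_cases ha : e = "+"
          · simp [ha]
          · by_cases hb : e = "*"
            · simp [hb]
            · by_cases hc : e = "/"
              · simp [hc]
              · by_cases hd : e = "^"
                · simp [hd]
                · simp [ha, hb, hc, hd]
        · simp [hl]

-- ===== VERDICT (by name: the statement is the Claim_ definition above) =====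
theorem splitLocations_spec : Claim_equal_splitLocations := by
  intro elements _
  unfold Spec_splitLocations splitLocations splitLocations_alt levels
  exact go_eq elements 0
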